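-- pv_equiv track=rewrite | github.com/structural-analysis/inelastic-structure | src/program/temp_test.py | get_point_final_pieces
-- ===== SOURCE A (Python) =====
-- def get_point_final_pieces(selected_pieces, violated_pieces, will_in_col_piece_num_in_structure, plastic_vars_in_basic_variables):
--     unchanged_vars = [will_in_col_piece_num_in_structure] + plastic_vars_in_basic_variables
--     final_pieces = selected_pieces[:]
--     assign_indices = [index for index, piece in enumerate(selected_pieces) if piece not in unchanged_vars]
--     assign_indices.sort(reverse=True)
--     for i, assign_index in enumerate(assign_indices):
--         if i < len(violated_pieces):
--             final_pieces[assign_index] = violated_pieces[i]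
--         else:
--             break
--     return final_pieces
-- ===== SOURCE B (Python) =====
-- def get_point_final_pieces(selected_pieces, violated_pieces, will_in_col_piece_num_in_structure, plastic_vars_in_basic_variables):
--     unchanged_vars = [will_in_col_piece_num_in_structure] + plastic_vars_in_basic_variables
--     k = sum(1 for piece in selected_pieces if piece not in unchanged_vars)
--     m = min(k, len(violated_pieces))
--     repl = violated_pieces[:m][::-1]
--     skip = k - m
--     final_pieces = []
--     j = 0
--     for piece in selected_pieces:
--         if piece in unchanged_vars:
--             final_pieces.append(piece)
--         else:
--             final_pieces.append(repl[j - skip] if j >= skip else piece)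
--             j += 1
--     return final_pieces
-- ===== Notes on version B (the rewrite author's own statement) =====
-- stated objective: alternative
-- what changed: B replaces A's collect-indices/sort-descending/mutate pass by a count-then-build scheme: one pass counts replaceable pieces, the exactly-used prefix of violated_pieces is reversed up front, and the output list is built in a single forward pass with a running replaceable rank.
import Mathlib
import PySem

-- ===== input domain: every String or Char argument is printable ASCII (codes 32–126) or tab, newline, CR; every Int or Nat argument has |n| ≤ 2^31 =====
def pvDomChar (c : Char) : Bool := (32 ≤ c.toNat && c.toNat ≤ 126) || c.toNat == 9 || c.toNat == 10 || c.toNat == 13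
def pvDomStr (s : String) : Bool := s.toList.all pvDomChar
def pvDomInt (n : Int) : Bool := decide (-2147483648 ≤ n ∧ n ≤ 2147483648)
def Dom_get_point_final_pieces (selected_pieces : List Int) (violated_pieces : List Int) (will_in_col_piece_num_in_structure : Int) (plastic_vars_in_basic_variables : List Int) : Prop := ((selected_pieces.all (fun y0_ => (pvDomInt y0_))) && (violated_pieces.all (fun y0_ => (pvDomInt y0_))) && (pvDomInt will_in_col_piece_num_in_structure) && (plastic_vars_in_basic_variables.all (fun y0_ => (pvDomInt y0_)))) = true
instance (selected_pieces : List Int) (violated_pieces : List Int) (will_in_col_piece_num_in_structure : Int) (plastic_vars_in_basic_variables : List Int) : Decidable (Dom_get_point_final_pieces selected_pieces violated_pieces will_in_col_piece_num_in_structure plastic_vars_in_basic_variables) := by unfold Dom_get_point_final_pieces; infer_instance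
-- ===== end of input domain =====

-- B replaces A's collect-indices / sort-descending / mutate scheme by count-then-build: one pass
-- counts the replaceable pieces, the exactly-used prefix of violated_pieces is reversed up front,
-- and the output is built in a single forward pass (objective: alternative); same return value.

-- ===== PORT A =====
-- the 'for i, assign_index in enumerate(assign_indices): … else: break' loop; indices come from
-- enumerate, hence are nonneg, so .toNat is exact, and i < len(violated) is checked before the read
def pvLoopA (viol : List Int) : List Int → List Int → Nat → List Int
  | final, [], _ => final
  | final, a :: rest, i =>
    if i < viol.length then pvLoopA viol (final.set a.toNat (viol.getD i 0)) rest (i + 1)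
    else final

def get_point_final_pieces (selected_pieces : List Int) (violated_pieces : List Int) (will_in_col_piece_num_in_structure : Int) (plastic_vars_in_basic_variables : List Int) : List Int :=
  let unchanged_vars : List Int := will_in_col_piece_num_in_structure :: plastic_vars_in_basic_variables
  let final_pieces := selected_pieces
  let assign_indices : List Int :=
    ((PySem.List.enumerate selected_pieces).filter (fun p => !(unchanged_vars.contains p.2))).map (·.1)
  let assign_indices := PySem.List.sorted assign_indices (fun x => x) true
  pvLoopA violated_pieces final_pieces assign_indices 0

-- ===== PORT B =====
-- the 'for piece in selected_pieces: …' building loop of Source B; j counts replaceable pieces seen,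
-- km = k - m, repl = violated_pieces[:m][::-1]; repl[j-km] is in range, so getD is exact
def pvFwd (unch repl : List Int) (km : Nat) : List Int → Nat → List Int
  | [], _ => []
  | p :: rest, j =>
    if unch.contains p then p :: pvFwd unch repl km rest j
    else if km ≤ j then repl.getD (j - km) 0 :: pvFwd unch repl km rest (j + 1)
    else p :: pvFwd unch repl km rest (j + 1)

def get_point_final_pieces_alt (selected_pieces : List Int) (violated_pieces : List Int) (will_in_col_piece_num_in_structure : Int) (plastic_vars_in_basic_variables : List Int) : List Int :=
  let unchanged_vars : List Int := will_in_col_piece_num_in_structure :: plastic_vars_in_basic_variables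
  let k : Nat := selected_pieces.countP (fun piece => !(unchanged_vars.contains piece))
  let m : Nat := min k violated_pieces.length
  let repl : List Int := (violated_pieces.take m).reverse   -- violated_pieces[:m][::-1], exact: 0 ≤ m
  pvFwd unchanged_vars repl (k - m) selected_pieces 0

-- ===== PRECONDITION & SPEC =====
def Spec_get_point_final_pieces (selected_pieces : List Int) (violated_pieces : List Int) (will_in_col_piece_num_in_structure : Int) (plastic_vars_in_basic_variables : List Int) (out : List Int) : Prop := out = get_point_final_pieces_alt selected_pieces violated_pieces will_in_col_piece_num_in_structure plastic_vars_in_basic_variables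
instance (selected_pieces : List Int) (violated_pieces : List Int) (will_in_col_piece_num_in_structure : Int) (plastic_vars_in_basic_variables : List Int) (out : List Int) : Decidable (Spec_get_point_final_pieces selected_pieces violated_pieces will_in_col_piece_num_in_structure plastic_vars_in_basic_variables out) := by unfold Spec_get_point_final_pieces; infer_instance

-- ===== CLAIM (what is proved, stated in full; the proofs are below) =====
def Claim_equal_get_point_final_pieces : Prop := ∀ (selected_pieces : List Int) (violated_pieces : List Int) (will_in_col_piece_num_in_structure : Int) (plastic_vars_in_basic_variables : List Int), Dom_get_point_final_pieces selected_pieces violated_pieces will_in_col_piece_num_in_structure plastic_vars_in_basic_variables → Spec_get_point_final_pieces selected_pieces violated_pieces will_in_col_piece_num_in_structure plastic_vars_in_basic_variables (get_point_final_pieces selected_pieces violated_pieces will_in_col_piece_num_in_structure plastic_vars_in_basic_variables)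

-- ===== LEMMAS AND PROOFS =====

-- proof-only intermediate: A's sorted backward assignment as a single reverse scan with a counter
def pvBack (sel viol unchanged : List Int) : List Int → Nat → Nat → List Int
  | final, 0, _ => final
  | final, n + 1, i =>
    if viol.length ≤ i then final
    else if unchanged.contains (sel.getD n 0) then pvBack sel viol unchanged final n i
    else pvBack sel viol unchanged (final.set n (viol.getD i 0)) n (i + 1)

-- A's assign_indices restricted to the first n positions
def pvIdxs (sel unchanged : List Int) (n : Nat) : List Int :=
  ((PySem.List.enumerate (sel.take n)).filter (fun p => !(unchanged.contains p.2))).map (·.1)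

theorem pvLoopA_cons (viol final : List Int) (a : Int) (rest : List Int) (i : Nat)
    (h : i < viol.length) :
    pvLoopA viol final (a :: rest) i
      = pvLoopA viol (final.set a.toNat (viol.getD i 0)) rest (i + 1) := by
  simp [pvLoopA, h]

theorem pvLoopA_of_len_le (viol final : List Int) (l : List Int) (i : Nat)
    (h : ¬ i < viol.length) : pvLoopA viol final l i = final := by
  cases l <;> simp [pvLoopA, h]

theorem pvIdxs_pairwise_lt (sel unchanged : List Int) (n : Nat) :
    (pvIdxs sel unchanged n).Pairwise (· < ·) := by
  unfold pvIdxs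
  exact List.Pairwise.map _ (fun _ _ h => h)
    ((PySem.List.pairwise_lt_enumerate (sel.take n) 0).filter _)

theorem pvIdxs_succ (sel unchanged : List Int) (n : Nat) (hn : n < sel.length) :
    pvIdxs sel unchanged (n + 1) =
      pvIdxs sel unchanged n ++
        (if unchanged.contains (sel.getD n 0) then [] else [(n : Int)]) := by
  unfold pvIdxs
  rw [show sel.take (n + 1) = sel.take n ++ [sel[n]] from by
    simp [List.take_add_one (l := sel) (i := n)]]
  rw [PySem.List.enumerate_append]
  simp [PySem.List.enumerate, List.getD, List.getElem?_eq_getElem hn]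
  split <;> simp_all
  omega

theorem pvBack_eq_loopA (sel viol unchanged : List Int) :
    ∀ (n : Nat), n ≤ sel.length → ∀ (final : List Int) (i : Nat),
      pvBack sel viol unchanged final n i =
        pvLoopA viol final (pvIdxs sel unchanged n).reverse i := by
  intro n
  induction n with
  | zero => intro _ final i; simp [pvBack, pvLoopA, pvIdxs]
  | succ n ih =>
    intro hle final i
    have hn : n < sel.length := hle
    rw [pvIdxs_succ sel unchanged n hn]
    by_cases hi : viol.length ≤ i
    · rw [pvLoopA_of_len_le viol final _ i (by omega)]
      simp [pvBack, hi]
    · by_cases hc : unchanged.contains (sel.getD n 0)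
      · simp only [pvBack, if_neg hi, if_pos hc, List.append_nil]
        exact ih (le_of_lt hn) final i
      · simp only [pvBack, if_neg hi, if_neg hc, List.reverse_append, List.reverse_cons,
          List.reverse_nil, List.nil_append, List.singleton_append]
        rw [pvLoopA_cons viol final _ _ i (by omega)]
        simpa using ih (le_of_lt hn) _ (i + 1)

theorem sorted_rev_idxs (sel unchanged : List Int) :
    PySem.List.sorted
        (((PySem.List.enumerate sel).filter (fun p => !(unchanged.contains p.2))).map (·.1))
        (fun x => x) true
      = (pvIdxs sel unchanged sel.length).reverse := by
  have hidx : pvIdxs sel unchanged sel.length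
      = ((PySem.List.enumerate sel).filter (fun p => !(unchanged.contains p.2))).map (·.1) := by
    unfold pvIdxs; rw [List.take_length]
  rw [hidx]
  apply PySem.List.sorted_rev_eq_of_perm_of_pairwise_gt
  · exact List.reverse_perm _
  · have := pvIdxs_pairwise_lt sel unchanged sel.length
    rw [hidx] at this
    simpa using this.reverse

-- replaceable count among the first n pieces
def pvCnt (sel unch : List Int) (n : Nat) : Nat :=
  (sel.take n).countP (fun p => !(unch.contains p))

theorem pvCnt_succ (sel unch : List Int) (n : Nat) (hn : n < sel.length) :
    pvCnt sel unch (n + 1)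
      = pvCnt sel unch n + (if unch.contains (sel.getD n 0) then 0 else 1) := by
  unfold pvCnt
  rw [show sel.take (n + 1) = sel.take n ++ [sel[n]] from by
    simp [List.take_add_one (l := sel) (i := n)]]
  rw [List.countP_append]
  have hg : sel.getD n 0 = sel[n] := by simp [List.getD, List.getElem?_eq_getElem hn]

  rw [hg]
  simp

theorem pvCnt_mono (sel unch : List Int) {a b : Nat} (h : a ≤ b) :
    pvCnt sel unch a ≤ pvCnt sel unch b := by
  unfold pvCnt
  rw [show b = a + (b - a) from by omega, List.take_add, List.countP_append]
  omega

theorem pvBack_length (sel viol unch : List Int) :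
    ∀ (n : Nat) (final : List Int) (i : Nat),
      (pvBack sel viol unch final n i).length = final.length := by
  intro n
  induction n with
  | zero => intro final i; rfl
  | succ n ih =>
    intro final i
    unfold pvBack
    split
    · rfl
    split
    · exact ih final i
    · rw [ih]; simp

theorem pvBack_getElem? (sel viol unch : List Int) :
    ∀ (n : Nat), n ≤ sel.length → ∀ (final : List Int), final.length = sel.length →
      ∀ (i t : Nat),
      (pvBack sel viol unch final n i)[t]? =
        if t < n ∧ (!(unch.contains (sel.getD t 0))) = true
            ∧ i + (pvCnt sel unch n - pvCnt sel unch (t + 1)) < viol.length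
        then viol[(i + (pvCnt sel unch n - pvCnt sel unch (t + 1)))]?
        else final[t]? := by
  intro n
  induction n with
  | zero =>
    intro _ final _ i t
    simp [pvBack]
  | succ n ih =>
    intro hle final hlen i t
    have hn : n < sel.length := hle
    by_cases hi : viol.length ≤ i
    · have : ¬ (t < n + 1 ∧ (!(unch.contains (sel.getD t 0))) = true
          ∧ i + (pvCnt sel unch (n + 1) - pvCnt sel unch (t + 1)) < viol.length) := by
        rintro ⟨_, _, h3⟩; omega
      simp only [pvBack, if_pos hi, if_neg this]
    · by_cases hc : unch.contains (sel.getD n 0)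
      · have hcnt : pvCnt sel unch (n + 1) = pvCnt sel unch n := by
          rw [pvCnt_succ sel unch n hn, if_pos hc]; omega
        simp only [pvBack, if_neg hi, if_pos hc]
        rw [ih (le_of_lt hn) final hlen i t, hcnt]
        by_cases ht : t = n
        · subst ht
          have hb : ¬ (!(unch.contains (sel.getD t 0))) = true := by
            simpa [List.getD] using hc
          rw [if_neg (by rintro ⟨_, h2, _⟩; exact hb h2),
            if_neg (by rintro ⟨_, h2, _⟩; exact hb h2)]
        · congr 1
          simp only [eq_iff_iff]
          constructor
          · rintro ⟨h1, h2, h3⟩; exact ⟨by omega, h2, h3⟩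
          · rintro ⟨h1, h2, h3⟩
            exact ⟨by omega, h2, h3⟩
      · have hcnt : pvCnt sel unch (n + 1) = pvCnt sel unch n + 1 := by
          rw [pvCnt_succ sel unch n hn, if_neg hc]
        simp only [pvBack, if_neg hi, if_neg hc]
        rw [ih (le_of_lt hn) (final.set n (viol.getD i 0)) (by simpa using hlen) (i + 1) t]
        by_cases ht : t < n
        · have hmono : pvCnt sel unch (t + 1) ≤ pvCnt sel unch n :=
            pvCnt_mono sel unch (by omega)
          have harith : i + 1 + (pvCnt sel unch n - pvCnt sel unch (t + 1))
              = i + (pvCnt sel unch (n + 1) - pvCnt sel unch (t + 1)) := by omega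
          rw [harith]
          have hset : (final.set n (viol.getD i 0))[t]? = final[t]? := by
            rw [List.getElem?_set_ne (by omega)]
          rw [hset]
          congr 1
          simp only [eq_iff_iff]
          constructor
          · rintro ⟨_, h2, h3⟩; exact ⟨by omega, h2, h3⟩
          · rintro ⟨_, h2, h3⟩; exact ⟨ht, h2, h3⟩
        · by_cases ht' : t = n
          · subst ht'
            have hfalse : ¬ (t < t ∧ (!(unch.contains (sel.getD t 0))) = true
                ∧ i + 1 + (pvCnt sel unch t - pvCnt sel unch (t + 1)) < viol.length) := by
              rintro ⟨h1, _, _⟩; omega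
            rw [if_neg hfalse]
            have hcond : t < t + 1 ∧ (!(unch.contains (sel.getD t 0))) = true
                ∧ i + (pvCnt sel unch (t + 1) - pvCnt sel unch (t + 1)) < viol.length := by
              refine ⟨by omega, by simpa using hc, by omega⟩
            rw [if_pos hcond]
            have hlt : t < final.length := by omega
            rw [List.getElem?_set_self (by omega)]
            have : i + (pvCnt sel unch (t + 1) - pvCnt sel unch (t + 1)) = i := by omega
            rw [this, List.getElem?_eq_getElem (by omega : i < viol.length)]
            simp [List.getD, List.getElem?_eq_getElem (by omega : i < viol.length)]
          · have h1 : ¬ (t < n ∧ (!(unch.contains (sel.getD t 0))) = true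
                ∧ i + 1 + (pvCnt sel unch n - pvCnt sel unch (t + 1)) < viol.length) := by
              rintro ⟨h, _, _⟩; omega
            have h2 : ¬ (t < n + 1 ∧ (!(unch.contains (sel.getD t 0))) = true
                ∧ i + (pvCnt sel unch (n + 1) - pvCnt sel unch (t + 1)) < viol.length) := by
              rintro ⟨h, _, _⟩; omega
            rw [if_neg h1, if_neg h2, List.getElem?_set_ne (by omega)]

theorem pvFwd_length (unch repl : List Int) (km : Nat) :
    ∀ (l : List Int) (j : Nat), (pvFwd unch repl km l j).length = l.length := by
  intro l
  induction l with
  | nil => intro j; rfl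
  | cons p rest ih =>
    intro j
    unfold pvFwd
    split
    · simp [ih]
    split <;> simp [ih]

theorem pvFwd_getElem? (unch repl : List Int) (km : Nat) :
    ∀ (l : List Int) (j t : Nat), t < l.length →
      (pvFwd unch repl km l j)[t]? =
        some (if (!(unch.contains (l.getD t 0))) = true
                  ∧ km ≤ j + (l.take t).countP (fun p => !(unch.contains p))
              then repl.getD (j + (l.take t).countP (fun p => !(unch.contains p)) - km) 0
              else l.getD t 0) := by
  intro l
  induction l with
  | nil => intro j t ht; simp at ht
  | cons p rest ih =>
    intro j t ht
    cases t with
    | zero =>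
      by_cases hc : unch.contains p
      · rw [if_neg (by rintro ⟨h1, _⟩; rw [List.getD_cons_zero, hc] at h1; simp at h1)]
        unfold pvFwd
        rw [if_pos hc]
        rfl
      · by_cases hj : km ≤ j
        · rw [if_pos ⟨by simpa using hc, by simpa using hj⟩]
          unfold pvFwd
          rw [if_neg hc, if_pos hj]
          simp
        · rw [if_neg (by rintro ⟨_, h2⟩; simp at h2; omega)]
          unfold pvFwd
          rw [if_neg hc, if_neg hj]
          rfl
    | succ t =>
      have ht' : t < rest.length := by simpa using ht
      by_cases hc : unch.contains p
      · have hstep : pvFwd unch repl km (p :: rest) j = p :: pvFwd unch repl km rest j := by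
          simp only [pvFwd]; rw [if_pos hc]
        have hcp : ((p :: rest).take (t + 1)).countP (fun q => !(unch.contains q))
            = (rest.take t).countP (fun q => !(unch.contains q)) := by
          simp [List.countP_cons]; simpa using hc
        rw [hstep, List.getElem?_cons_succ, ih j t ht', List.getD_cons_succ, hcp]
      · have hcp : ((p :: rest).take (t + 1)).countP (fun q => !(unch.contains q))
            = (rest.take t).countP (fun q => !(unch.contains q)) + 1 := by
          simp [List.countP_cons]; simpa using hc
        by_cases hj : km ≤ j
        · have hstep : pvFwd unch repl km (p :: rest) j
              = repl.getD (j - km) 0 :: pvFwd unch repl km rest (j + 1) := by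
            simp only [pvFwd]; rw [if_neg hc, if_pos hj]
          rw [hstep, List.getElem?_cons_succ, ih (j + 1) t ht', List.getD_cons_succ, hcp,
            show j + 1 + (rest.take t).countP (fun q => !(unch.contains q))
                = j + ((rest.take t).countP (fun q => !(unch.contains q)) + 1) from by omega]
        · have hstep : pvFwd unch repl km (p :: rest) j
              = p :: pvFwd unch repl km rest (j + 1) := by
            simp only [pvFwd]; rw [if_neg hc, if_neg hj]
          rw [hstep, List.getElem?_cons_succ, ih (j + 1) t ht', List.getD_cons_succ, hcp,
            show j + 1 + (rest.take t).countP (fun q => !(unch.contains q))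
                = j + ((rest.take t).countP (fun q => !(unch.contains q)) + 1) from by omega]

-- the backward scan with counter equals B's forward count-then-build pass
theorem pvRevTake_getD (viol : List Int) (m s : Nat) (hm : m ≤ viol.length) (hs : s < m) :
    ((viol.take m).reverse).getD s 0 = viol.getD (m - 1 - s) 0 := by
  have hlen : (viol.take m).length = m := by simp [hm]
  have h1 : s < (viol.take m).reverse.length := by simp [hlen]; omega
  have h2 : m - 1 - s < viol.length := by omega
  rw [List.getD, List.getD, List.getElem?_eq_getElem h1, List.getElem?_eq_getElem h2]
  simp only [Option.getD_some]
  rw [List.getElem_reverse]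
  simp only [hlen]
  rw [List.getElem_take]

theorem pvBack_eq_fwd (sel viol unch : List Int) :
    pvBack sel viol unch sel sel.length 0
      = pvFwd unch ((viol.take (min (sel.countP (fun p => !(unch.contains p))) viol.length)).reverse)
          (sel.countP (fun p => !(unch.contains p))
            - min (sel.countP (fun p => !(unch.contains p))) viol.length) sel 0 := by
  apply List.ext_getElem?
  intro t
  by_cases ht : t < sel.length
  · rw [pvBack_getElem? sel viol unch sel.length (le_refl _) sel rfl 0 t,
      pvFwd_getElem? unch _ _ sel 0 t ht]
    have htake : (sel.take t).countP (fun p => !(unch.contains p)) = pvCnt sel unch t := rfl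
    have hsel : sel.countP (fun p => !(unch.contains p)) = pvCnt sel unch sel.length := by
      unfold pvCnt; rw [List.take_length]
    rw [htake, hsel]
    have hC : pvCnt sel unch (t + 1)
        = pvCnt sel unch t + (if unch.contains (sel.getD t 0) then 0 else 1) :=
      pvCnt_succ sel unch t ht
    have hCK : pvCnt sel unch (t + 1) ≤ pvCnt sel unch sel.length :=
      pvCnt_mono sel unch (by omega)
    have hRC : pvCnt sel unch t ≤ pvCnt sel unch (t + 1) := pvCnt_mono sel unch (by omega)
    by_cases hc : unch.contains (sel.getD t 0)
    · rw [if_neg (by rintro ⟨_, h2, _⟩; rw [hc] at h2; simp at h2),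
        if_neg (by rintro ⟨h2, _⟩; rw [hc] at h2; simp at h2)]
      rw [List.getElem?_eq_getElem ht]
      simp [List.getD, List.getElem?_eq_getElem ht]
    · have hbool : (!(unch.contains (sel.getD t 0))) = true := by
        cases hb : unch.contains (sel.getD t 0)
        · rfl
        · exact absurd hb hc
      have hC1 : pvCnt sel unch (t + 1) = pvCnt sel unch t + 1 := by rw [hC, if_neg hc]
      by_cases hcond : pvCnt sel unch sel.length
          - min (pvCnt sel unch sel.length) viol.length ≤ 0 + pvCnt sel unch t
      · have hKC : 0 + (pvCnt sel unch sel.length - pvCnt sel unch (t + 1)) < viol.length := by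
          omega
        rw [if_pos ⟨ht, hbool, hKC⟩, if_pos ⟨hbool, hcond⟩]
        have hmv : min (pvCnt sel unch sel.length) viol.length ≤ viol.length := by omega
        have hs : 0 + pvCnt sel unch t
            - (pvCnt sel unch sel.length - min (pvCnt sel unch sel.length) viol.length)
            < min (pvCnt sel unch sel.length) viol.length := by omega
        rw [pvRevTake_getD viol _ _ hmv hs]
        have hidx : min (pvCnt sel unch sel.length) viol.length - 1
            - (0 + pvCnt sel unch t
              - (pvCnt sel unch sel.length - min (pvCnt sel unch sel.length) viol.length))
            = 0 + (pvCnt sel unch sel.length - pvCnt sel unch (t + 1)) := by omega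
        rw [hidx]
        have hklt : 0 + (pvCnt sel unch sel.length - pvCnt sel unch (t + 1)) < viol.length := hKC
        rw [List.getElem?_eq_getElem hklt]
        simp only [List.getD, Nat.zero_add,
          List.getElem?_eq_getElem
            (show pvCnt sel unch sel.length - pvCnt sel unch (t + 1) < viol.length by omega),
          Option.getD_some]
      · have hnlt : ¬ (0 + (pvCnt sel unch sel.length - pvCnt sel unch (t + 1)) < viol.length) := by
          omega
        rw [if_neg (by rintro ⟨_, _, h3⟩; exact hnlt h3),
          if_neg (by rintro ⟨_, h2⟩; exact hcond h2)]
        rw [List.getElem?_eq_getElem ht]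
        simp [List.getD, List.getElem?_eq_getElem ht]
  · have h1 : (pvBack sel viol unch sel sel.length 0).length = sel.length :=
      pvBack_length sel viol unch sel.length sel 0
    have h2 : (pvFwd unch
        ((viol.take (min (sel.countP (fun p => !(unch.contains p))) viol.length)).reverse)
        (sel.countP (fun p => !(unch.contains p))
          - min (sel.countP (fun p => !(unch.contains p))) viol.length) sel 0).length
        = sel.length :=
      pvFwd_length unch _ _ sel 0
    rw [List.getElem?_eq_none (by omega), List.getElem?_eq_none (by rw [h2]; omega)]

-- ===== VERDICT (by name: the statement is the Claim_ definition above) =====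
theorem get_point_final_pieces_spec : Claim_equal_get_point_final_pieces := by
  intro sel viol w pl _
  unfold Spec_get_point_final_pieces get_point_final_pieces get_point_final_pieces_alt
  simp only []
  rw [sorted_rev_idxs sel (w :: pl),
    ← pvBack_eq_loopA sel viol (w :: pl) sel.length (le_refl _) sel 0,
    pvBack_eq_fwd sel viol (w :: pl)]
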